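-- pv_equiv track=rewrite | github.com/D1SST/laba5 | Laba5.py | iterative_f
-- ===== SOURCE A (Python) =====
-- def iterative_f(n):
--     if n < 2:
--         return 100
--     else:
--         a = 100
--         for i in range(2, n + 1):
--             if i < 5:
--                 b = (-1) * a + 100
--             else:
--                 b = (-1) * a + iterative_f(i // 5)
--             a = b
--         return b
-- ===== SOURCE B (Python) =====
-- def iterative_f(n):
--     if n < 2:
--         return 100
--     vals = [100, 100]  # vals[k] == iterative_f(k) for every k computed so far
--     a = 100
--     for i in range(2, n + 1):
--         a = -a + (100 if i < 5 else vals[i // 5])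
--         vals.append(a)
--     return a
-- ===== Notes on version B (the rewrite author's own statement) =====
-- stated objective: faster
-- what changed: Replaces the unmemoized recursion (each loop step recursively re-runs iterative_f(i//5) from scratch) with a single bottom-up pass that keeps all previously computed values in a list and looks up vals[i//5] in O(1).
import Mathlib
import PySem

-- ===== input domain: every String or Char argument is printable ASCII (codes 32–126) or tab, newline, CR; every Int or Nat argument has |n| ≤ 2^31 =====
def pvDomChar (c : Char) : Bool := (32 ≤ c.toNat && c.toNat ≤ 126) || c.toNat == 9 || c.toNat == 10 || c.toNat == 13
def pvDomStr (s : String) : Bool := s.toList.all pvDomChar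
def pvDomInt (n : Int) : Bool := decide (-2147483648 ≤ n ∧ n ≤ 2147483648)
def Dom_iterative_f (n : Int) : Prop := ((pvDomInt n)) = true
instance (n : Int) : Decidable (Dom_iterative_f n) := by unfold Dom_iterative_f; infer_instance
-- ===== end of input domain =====

-- B replaces A's unmemoized recursion with one bottom-up pass storing earlier values; faster (asymptotic).

-- ===== PORT A =====
-- A's recursion is factored through Nat (the recursive argument i//5 with i ≥ 5 is ≥ 1,
-- and fA m = iterative_f m for every m ≥ 0, and also for m < 2 where both return 100).
-- loopA is A's `for i in range(2, n+1)` loop with state (a, b), written as a tail recursion.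
mutual
def fA (n : Nat) : Int :=
  if n < 2 then 100 else loopA n 2 100 100
termination_by (n + 1, 0)
decreasing_by
  exact Prod.Lex.left _ _ (Nat.lt_succ_self n)
def loopA (n i : Nat) (a b : Int) : Int :=
  if h : i ≤ n then
    let b' := if h5 : i < 5 then (-1) * a + 100 else (-1) * a + fA (i / 5)
    loopA n (i + 1) b' b'
  else b
termination_by (n, n + 1 - i)
decreasing_by
  · rcases Nat.lt_or_ge (i / 5 + 1) n with hlt | hge
    · exact Prod.Lex.left _ _ hlt
    · have hdiv : i / 5 < i := Nat.div_lt_self (by omega) (by omega)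
      have heq : i / 5 + 1 = n := by omega
      rw [heq]; exact Prod.Lex.right _ (by omega)
  · exact Prod.Lex.right _ (by omega)
end

def iterative_f (n : Int) : Int :=
  if n < 2 then 100 else loopA n.toNat 2 100 100

-- ===== PORT B =====
-- loopB is B's single pass: `vals` holds the values for 0..i-1, `a` the last one.
def loopB (n i : Nat) (vals : List Int) (a : Int) : Int :=
  if i ≤ n then
    let a' := -a + (if i < 5 then 100 else vals.getD (i / 5) 0)
    loopB n (i + 1) (vals ++ [a']) a'
  else a
termination_by n + 1 - i

def iterative_f_alt (n : Int) : Int :=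
  if n < 2 then 100 else loopB n.toNat 2 [100, 100] 100

-- ===== PRECONDITION & SPEC =====
def Spec_iterative_f (n : Int) (out : Int) : Prop := out = iterative_f_alt n
instance (n : Int) (out : Int) : Decidable (Spec_iterative_f n out) := by unfold Spec_iterative_f; infer_instance

-- ===== CLAIM (what is proved, stated in full; the proofs are below) =====
def Claim_equal_iterative_f : Prop := ∀ (n : Int), Dom_iterative_f n → Spec_iterative_f n (iterative_f n)

-- ===== LEMMAS AND PROOFS =====

-- the additive term used at step i (identical in both loops once vals is correct)
def stepC (i : Nat) : Int := if i < 5 then 100 else fA (i / 5)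

theorem loopA_stop (n i : Nat) (a b : Int) (h : ¬ i ≤ n) : loopA n i a b = b := by
  rw [loopA.eq_def, dif_neg h]

theorem loopA_step (n i : Nat) (a b : Int) (h : i ≤ n) :
    loopA n i a b = loopA n (i + 1) ((-1) * a + stepC i) ((-1) * a + stepC i) := by
  rw [loopA.eq_def, dif_pos h]
  by_cases h5 : i < 5
  · simp [stepC, h5]
  · simp [stepC, h5]

theorem loopB_stop (n i : Nat) (vals : List Int) (a : Int) (h : ¬ i ≤ n) :
    loopB n i vals a = a := by
  rw [loopB.eq_def, if_neg h]

theorem loopB_step (n i : Nat) (vals : List Int) (a : Int) (h : i ≤ n) :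
    loopB n i vals a =
      loopB n (i + 1) (vals ++ [-a + (if i < 5 then 100 else vals.getD (i / 5) 0)])
        (-a + (if i < 5 then 100 else vals.getD (i / 5) 0)) := by
  rw [loopB.eq_def, if_pos h]

-- Peeling the LAST iteration off A's loop (the loop states always have a = b).
theorem loopA_peel (n : Nat) : ∀ k i a, 2 ≤ i → i ≤ n → n - i = k →
    loopA n i a a = (-1) * (loopA (n - 1) i a a) + stepC n := by
  intro k
  induction k with
  | zero =>
    intro i a h2 hin hk
    have hin' : i = n := by omega
    subst hin'
    rw [loopA_step i i a a (le_refl i), loopA_stop i (i + 1) _ _ (by omega),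
      loopA_stop (i - 1) i a a (by omega)]
  | succ k ih =>
    intro i a h2 hin hk
    have hi : i < n := by omega
    rw [loopA_step n i a a (by omega), loopA_step (n - 1) i a a (by omega)]
    exact ih (i + 1) _ (by omega) (by omega) (by omega)

theorem fA_small (m : Nat) (h : m < 2) : fA m = 100 := by
  rw [fA.eq_def, if_pos h]

-- the recurrence fA satisfies
theorem fA_rec (i : Nat) (h2 : 2 ≤ i) : fA i = (-1) * fA (i - 1) + stepC i := by
  rcases Nat.eq_or_lt_of_le h2 with h | h
  · subst h
    rw [fA.eq_def, if_neg (by omega), loopA_step 2 2 100 100 (by omega),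
      loopA_stop 2 3 _ _ (by omega), fA_small 1 (by omega)]
  · rw [fA.eq_def, if_neg (by omega),
      loopA_peel i (i - 2) 2 100 (by omega) (by omega) (by omega),
      fA.eq_def (i - 1), if_neg (by omega : ¬ i - 1 < 2)]

-- B's loop computes fA n given the invariant vals = [fA 0, …, fA (i-1)], a = fA (i-1).
theorem loopB_inv (n : Nat) : ∀ k i vals, 2 ≤ i → i ≤ n + 1 → n + 1 - i = k →
    vals.length = i → (∀ j, j < i → vals.getD j 0 = fA j) →
    loopB n i vals (fA (i - 1)) = fA n := by
  intro k
  induction k with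
  | zero =>
    intro i vals h2 hin hk _ _
    have : i = n + 1 := by omega
    subst this
    rw [loopB_stop _ _ _ _ (by omega)]
    congr 1
  | succ k ih =>
    intro i vals h2 hin hk hlen hvals
    have hi : i ≤ n := by omega
    rw [loopB_step n i vals _ hi]
    have hstep : (-(fA (i - 1)) + (if i < 5 then 100 else vals.getD (i / 5) 0)) = fA i := by
      rw [fA_rec i h2, stepC]
      by_cases h5 : i < 5
      · rw [if_pos h5, if_pos h5]; ring
      · have hlt : i / 5 < i := Nat.div_lt_self (by omega) (by omega)
        rw [if_neg h5, if_neg h5, hvals _ hlt]; ring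
    rw [hstep]
    refine ih (i + 1) (vals ++ [fA i]) (by omega) (by omega) (by omega)
      (by simp [hlen]) ?_
    intro j hj
    rcases Nat.lt_or_ge j i with hji | hji
    · rw [List.getD_append _ _ _ _ (by omega), hvals j hji]
    · have hje : j = i := by omega
      subst hje
      simp [List.getD, hlen]

-- ===== VERDICT (by name: the statement is the Claim_ definition above) =====
theorem iterative_f_spec : Claim_equal_iterative_f := by
  intro n _
  unfold Spec_iterative_f iterative_f iterative_f_alt
  by_cases h : n < 2
  · rw [if_pos h, if_pos h]
  · rw [if_neg h, if_neg h]
    have h2 : 2 ≤ n.toNat := by omega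
    have hfA : loopA n.toNat 2 100 100 = fA n.toNat := by
      rw [fA.eq_def, if_neg (by omega)]
    have hB := loopB_inv n.toNat (n.toNat + 1 - 2) 2 [100, 100] (by omega) (by omega) rfl rfl ?_
    · rw [fA_small (2 - 1) (by omega)] at hB
      rw [hfA, hB]
    · intro j hj
      interval_cases j
      · rw [show ([100, 100] : List Int).getD 0 0 = 100 from rfl, fA_small 0 (by omega)]
      · rw [show ([100, 100] : List Int).getD 1 0 = 100 from rfl, fA_small 1 (by omega)]
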